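-- pv_equiv track=rewrite | github.com/Wersusche/max2tg | app/max_client.py | _extract_html_attribute
-- ===== SOURCE A (Python) =====
-- def _extract_html_attribute(text: str, attr_name: str) -> str | None:
--     for quote in ('"', "'"):
--         marker = f"{attr_name}={quote}"
--         start = text.find(marker)
--         if start < 0:
--             continue
--
--         index = start + len(marker)
--         value_chars: list[str] = []
--         escaped = False
--         while index < len(text):
--             char = text[index]
--             if char == quote and not escaped:
--                 return "".join(value_chars)
--             if char == "\\" and not escaped:
--                 escaped = True
--                 value_chars.append(char)
--                 index += 1
--                 continue
--             escaped = False
--             value_chars.append(char)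
--             index += 1
--
--     return None
-- ===== SOURCE B (Python) =====
-- def _extract_html_attribute(text: str, attr_name: str) -> str | None:
--     # Slice-based variant: locate the marker, then advance a pointer that skips
--     # escape pairs ("\X") in one jump; the value is the untouched slice up to the
--     # first unescaped closing quote -- no per-char accumulator, no escaped flag.
--     for quote in ('"', "'"):
--         start = text.find(attr_name + "=" + quote)
--         if start < 0:
--             continue
--         vstart = start + len(attr_name) + 2
--         i = vstart
--         n = len(text)
--         while i < n:
--             c = text[i]
--             if c == quote:
--                 return text[vstart:i]
--             i += 2 if c == "\\" else 1
--     return None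
-- ===== Notes on version B (the rewrite author's own statement) =====
-- stated objective: simpler
-- what changed: A accumulates the value character by character with an 'escaped' boolean state machine and joins at the end; B instead advances a pointer that skips escape pairs in a single '+= 2' jump and returns the value as one slice of the original text, with no accumulator and no flag.
import Mathlib
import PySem

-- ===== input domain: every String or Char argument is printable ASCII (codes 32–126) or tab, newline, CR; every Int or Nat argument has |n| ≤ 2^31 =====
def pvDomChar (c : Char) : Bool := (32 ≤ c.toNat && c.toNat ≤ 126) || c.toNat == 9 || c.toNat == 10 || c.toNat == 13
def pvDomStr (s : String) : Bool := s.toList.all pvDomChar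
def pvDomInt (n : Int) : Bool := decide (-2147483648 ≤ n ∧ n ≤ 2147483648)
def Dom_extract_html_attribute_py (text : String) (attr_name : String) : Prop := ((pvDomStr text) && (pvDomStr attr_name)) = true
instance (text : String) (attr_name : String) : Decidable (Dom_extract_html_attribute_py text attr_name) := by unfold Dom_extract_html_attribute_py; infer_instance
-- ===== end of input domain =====

-- B replaces A's per-character accumulator + escaped flag with a pointer that skips
-- escape pairs in one jump and returns the value as a single slice (objective: simpler).

-- ===== PORT A =====
-- A's inner while loop: index/escaped state machine appending every consumed char.
def pvScanA (q : Char) : List Char → Bool → List Char → Option String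
  | [], _, _ => none
  | c :: rest, escaped, value_chars =>
    if c == q && !escaped then some (String.ofList value_chars)
    else if c == '\\' && !escaped then pvScanA q rest true (value_chars ++ [c])
    else pvScanA q rest false (value_chars ++ [c])

-- one iteration of A's 'for quote in ...' loop body
def pvTryA (text : String) (attr_name : String) (q : Char) : Option String :=
  let marker := attr_name.toList ++ ['=', q]
  let start := PySem.Chars.find text.toList marker
  if start < 0 then none
  else pvScanA q (text.toList.drop (start.toNat + marker.length)) false []

def extract_html_attribute_py (text : String) (attr_name : String) : Option String :=
  match pvTryA text attr_name '"' with
  | some v => some v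
  | none => pvTryA text attr_name '\''

-- ===== PORT B =====
-- B's inner while loop: pointer jumping 2 over "\X", returning the offset of the closer.
def pvScanB (q : Char) : List Char → Option Nat
  | [] => none
  | c :: rest =>
    if c == q then some 0
    else if c == '\\' then (pvScanB q (rest.drop 1)).map (· + 2)
    else (pvScanB q rest).map (· + 1)
termination_by l => l.length
decreasing_by
  all_goals simp

def pvTryB (text : String) (attr_name : String) (q : Char) : Option String :=
  let start := PySem.Chars.find text.toList (attr_name.toList ++ ['=', q])
  if start < 0 then none
  else
    let tail := text.toList.drop (start.toNat + (attr_name.toList.length + 2))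
    (pvScanB q tail).map (fun i => String.ofList (tail.take i))

def extract_html_attribute_py_alt (text : String) (attr_name : String) : Option String :=
  match pvTryB text attr_name '"' with
  | some v => some v
  | none => pvTryB text attr_name '\''

-- ===== PRECONDITION & SPEC =====
def Spec_extract_html_attribute_py (text : String) (attr_name : String) (out : Option String) : Prop := out = extract_html_attribute_py_alt text attr_name
instance (text : String) (attr_name : String) (out : Option String) : Decidable (Spec_extract_html_attribute_py text attr_name out) := by unfold Spec_extract_html_attribute_py; infer_instance

-- ===== CLAIM (what is proved, stated in full; the proofs are below) =====
def Claim_equal_extract_html_attribute_py : Prop := ∀ (text : String) (attr_name : String), Dom_extract_html_attribute_py text attr_name → Spec_extract_html_attribute_py text attr_name (extract_html_attribute_py text attr_name)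

-- ===== LEMMAS AND PROOFS =====

theorem pvScanB_nil (q : Char) : pvScanB q [] = none := by
  rw [pvScanB]

theorem pvScanB_cons (q c : Char) (rest : List Char) :
    pvScanB q (c :: rest) =
      if c == q then some 0
      else if c == '\\' then (pvScanB q (rest.drop 1)).map (· + 2)
      else (pvScanB q rest).map (· + 1) := by
  rw [pvScanB]

-- the two inner loops agree: A's accumulator equals the slice up to B's offset
theorem pvScan_eq (q : Char) : ∀ (n : Nat) (l : List Char), l.length ≤ n →
    ∀ acc, pvScanA q l false acc = (pvScanB q l).map (fun i => String.ofList (acc ++ l.take i)) := by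
  intro n
  induction n with
  | zero =>
    intro l hl acc
    have : l = [] := List.length_eq_zero_iff.mp (Nat.le_zero.mp hl)
    subst this
    simp [pvScanA, pvScanB_nil, pvScanB_cons]
  | succ m ih =>
    intro l hl acc
    match l with
    | [] => simp [pvScanA, pvScanB_nil, pvScanB_cons]
    | c :: rest =>
      by_cases hq : c = q
      · subst hq
        simp [pvScanA, pvScanB_nil, pvScanB_cons]
      · by_cases hb : c = '\\'
        · subst hb
          match rest with
          | [] =>
            simp [pvScanA, pvScanB_nil, pvScanB_cons, hq]
          | d :: rest' =>
            have h1 : pvScanA q ('\\' :: d :: rest') false acc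
                = pvScanA q rest' false (acc ++ ['\\'] ++ [d]) := by
              simp [pvScanA, hq]
            have hlen : rest'.length ≤ m := by
              simp at hl; omega
            rw [h1, ih rest' hlen]
            have h2 : pvScanB q ('\\' :: d :: rest')
                = (pvScanB q rest').map (· + 2) := by
              simp [pvScanB_nil, pvScanB_cons, hq]
            rw [h2]
            cases pvScanB q rest' with
            | none => simp
            | some j => simp [List.take_succ_cons]
        · have h1 : pvScanA q (c :: rest) false acc = pvScanA q rest false (acc ++ [c]) := by
            simp [pvScanA, hq, hb]
          have hlen : rest.length ≤ m := by simp at hl; omega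
          rw [h1, ih rest hlen]
          have h2 : pvScanB q (c :: rest) = (pvScanB q rest).map (· + 1) := by
            simp [pvScanB_cons, hq, hb]
          rw [h2]
          cases pvScanB q rest with
          | none => simp
          | some j => simp [List.take_succ_cons]

theorem pvTry_eq (text attr_name : String) (q : Char) :
    pvTryA text attr_name q = pvTryB text attr_name q := by
  unfold pvTryA pvTryB
  simp only
  split
  · rfl
  · have hlen : (attr_name.toList ++ ['=', q]).length = attr_name.toList.length + 2 := by
      simp
    rw [hlen]
    exact pvScan_eq q _ _ (Nat.le_refl _) []

-- ===== VERDICT (by name: the statement is the Claim_ definition above) =====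
theorem extract_html_attribute_py_spec : Claim_equal_extract_html_attribute_py := by
  intro text attr_name _
  unfold Spec_extract_html_attribute_py extract_html_attribute_py extract_html_attribute_py_alt
  rw [pvTry_eq text attr_name '"', pvTry_eq text attr_name '\'']
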